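-- pv_equiv track=rewrite | github.com/sulanaD/ContentForge | agents/editor_agent.py | _categorize_fixes
-- ===== SOURCE A (Python) =====
-- from typing import Dict, Any, List, Tuple, Optional
--
-- def _categorize_fixes(editing_log: List[str]) -> Dict[str, int]:
--     """Categorize the types of fixes applied."""
--     categories = {
--         'grammar': 0,
--         'style': 0,
--         'readability': 0,
--         'coherence': 0,
--         'structure': 0
--     }
--
--     for fix in editing_log:
--         fix_lower = fix.lower()
--         if 'grammar' in fix_lower:
--             categories['grammar'] += 1
--         elif 'style' in fix_lower or 'removed' in fix_lower:
--             categories['style'] += 1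
--         elif 'simplified' in fix_lower or 'split' in fix_lower:
--             categories['readability'] += 1
--         elif 'transition' in fix_lower:
--             categories['coherence'] += 1
--         else:
--             categories['structure'] += 1
--
--     return categories
-- ===== SOURCE B (Python) =====
-- from typing import Dict, List
--
-- def _categorize_fixes(editing_log: List[str]) -> Dict[str, int]:
--     """Categorize the types of fixes applied (staged counting passes;
--     'structure' is derived as the remainder)."""
--     lows = [fix.lower() for fix in editing_log]
--     grammar = sum(1 for l in lows if 'grammar' in l)
--     style = sum(1 for l in lows
--                 if 'grammar' not in l and ('style' in l or 'removed' in l))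
--     readability = sum(1 for l in lows
--                       if 'grammar' not in l and 'style' not in l and 'removed' not in l
--                       and ('simplified' in l or 'split' in l))
--     coherence = sum(1 for l in lows
--                     if 'grammar' not in l and 'style' not in l and 'removed' not in l
--                     and 'simplified' not in l and 'split' not in l
--                     and 'transition' in l)
--     return {
--         'grammar': grammar,
--         'style': style,
--         'readability': readability,
--         'coherence': coherence,
--         'structure': len(lows) - grammar - style - readability - coherence,
--     }
-- ===== Notes on version B (the rewrite author's own statement) =====
-- stated objective: alternative
-- what changed: Replaces the single per-entry if/elif dispatch loop updating a counts dict with staged counting passes: one independent count per category over the lowercased entries (each with its explicit exclusion predicate), and 'structure' computed arithmetically as the remainder len - sum of the others, so no per-entry categorization or dict mutation happens at all.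
import Mathlib
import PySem

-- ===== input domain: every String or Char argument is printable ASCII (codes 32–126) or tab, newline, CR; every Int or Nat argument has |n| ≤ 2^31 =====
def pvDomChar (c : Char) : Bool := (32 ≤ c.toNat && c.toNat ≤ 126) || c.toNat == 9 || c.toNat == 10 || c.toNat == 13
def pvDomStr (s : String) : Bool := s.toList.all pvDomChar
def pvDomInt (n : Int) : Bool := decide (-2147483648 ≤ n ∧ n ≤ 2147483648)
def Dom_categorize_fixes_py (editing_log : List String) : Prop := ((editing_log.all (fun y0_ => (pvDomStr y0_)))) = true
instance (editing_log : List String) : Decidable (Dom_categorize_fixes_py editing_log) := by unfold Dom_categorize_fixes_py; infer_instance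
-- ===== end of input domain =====

-- B replaces A's per-entry if/elif dispatch loop over a counts dict by staged counting
-- passes (one count per category, 'structure' derived as the remainder); objective: alternative.

-- ===== PORT A =====
def categorize_fixes_py (editing_log : List String) : List (String × Int) :=
  let categories : PySem.Dict String Int :=
    PySem.Dict.ofList [("grammar", 0), ("style", 0), ("readability", 0), ("coherence", 0), ("structure", 0)]
  let categories := editing_log.foldl (fun cs fix =>
    let fix_lower := PySem.Str.lower fix
    if PySem.Str.isIn "grammar" fix_lower then cs.modify "grammar" 0 (· + 1)
    else if PySem.Str.isIn "style" fix_lower || PySem.Str.isIn "removed" fix_lower then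
      cs.modify "style" 0 (· + 1)
    else if PySem.Str.isIn "simplified" fix_lower || PySem.Str.isIn "split" fix_lower then
      cs.modify "readability" 0 (· + 1)
    else if PySem.Str.isIn "transition" fix_lower then cs.modify "coherence" 0 (· + 1)
    else cs.modify "structure" 0 (· + 1)) categories
  categories.items

-- ===== PORT B =====
def categorize_fixes_py_alt (editing_log : List String) : List (String × Int) :=
  let lows := editing_log.map (fun fix => PySem.Str.lower fix)
  let grammar : Int := lows.countP (fun l => PySem.Str.isIn "grammar" l)
  let style : Int := lows.countP (fun l =>
    !PySem.Str.isIn "grammar" l && (PySem.Str.isIn "style" l || PySem.Str.isIn "removed" l))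
  let readability : Int := lows.countP (fun l =>
    !PySem.Str.isIn "grammar" l && !PySem.Str.isIn "style" l && !PySem.Str.isIn "removed" l
    && (PySem.Str.isIn "simplified" l || PySem.Str.isIn "split" l))
  let coherence : Int := lows.countP (fun l =>
    !PySem.Str.isIn "grammar" l && !PySem.Str.isIn "style" l && !PySem.Str.isIn "removed" l
    && !PySem.Str.isIn "simplified" l && !PySem.Str.isIn "split" l
    && PySem.Str.isIn "transition" l)
  [("grammar", grammar), ("style", style), ("readability", readability), ("coherence", coherence),
   ("structure", (lows.length : Int) - grammar - style - readability - coherence)]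

-- ===== PRECONDITION & SPEC =====
def Spec_categorize_fixes_py (editing_log : List String) (out : List (String × Int)) : Prop := out = categorize_fixes_py_alt editing_log
instance (editing_log : List String) (out : List (String × Int)) : Decidable (Spec_categorize_fixes_py editing_log out) := by unfold Spec_categorize_fixes_py; infer_instance

-- ===== CLAIM (what is proved, stated in full; the proofs are below) =====
def Claim_equal_categorize_fixes_py : Prop := ∀ (editing_log : List String), Dom_categorize_fixes_py editing_log → Spec_categorize_fixes_py editing_log (categorize_fixes_py editing_log)

-- ===== LEMMAS AND PROOFS =====

-- the five (mutually exclusive, exhaustive) per-entry predicates, stated on the raw entry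
def qG (fix : String) : Bool := PySem.Str.isIn "grammar" (PySem.Str.lower fix)
def qS (fix : String) : Bool :=
  !qG fix && (PySem.Str.isIn "style" (PySem.Str.lower fix) || PySem.Str.isIn "removed" (PySem.Str.lower fix))
def qR (fix : String) : Bool :=
  !qG fix && !PySem.Str.isIn "style" (PySem.Str.lower fix) && !PySem.Str.isIn "removed" (PySem.Str.lower fix)
  && (PySem.Str.isIn "simplified" (PySem.Str.lower fix) || PySem.Str.isIn "split" (PySem.Str.lower fix))
def qC (fix : String) : Bool :=
  !qG fix && !PySem.Str.isIn "style" (PySem.Str.lower fix) && !PySem.Str.isIn "removed" (PySem.Str.lower fix)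
  && !PySem.Str.isIn "simplified" (PySem.Str.lower fix) && !PySem.Str.isIn "split" (PySem.Str.lower fix)
  && PySem.Str.isIn "transition" (PySem.Str.lower fix)
def qT (fix : String) : Bool := !qG fix && !qS fix && !qR fix && !qC fix

-- one step of A's loop from a literal dict bumps exactly the slot of the matching predicate
lemma step_mk (a b c d e : Int) (x : String) :
    (let fix_lower := PySem.Str.lower x
     if PySem.Str.isIn "grammar" fix_lower then
       (PySem.Dict.mk [("grammar", a), ("style", b), ("readability", c), ("coherence", d), ("structure", e)]).modify "grammar" 0 (· + 1)
     else if PySem.Str.isIn "style" fix_lower || PySem.Str.isIn "removed" fix_lower then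
       (PySem.Dict.mk [("grammar", a), ("style", b), ("readability", c), ("coherence", d), ("structure", e)]).modify "style" 0 (· + 1)
     else if PySem.Str.isIn "simplified" fix_lower || PySem.Str.isIn "split" fix_lower then
       (PySem.Dict.mk [("grammar", a), ("style", b), ("readability", c), ("coherence", d), ("structure", e)]).modify "readability" 0 (· + 1)
     else if PySem.Str.isIn "transition" fix_lower then
       (PySem.Dict.mk [("grammar", a), ("style", b), ("readability", c), ("coherence", d), ("structure", e)]).modify "coherence" 0 (· + 1)
     else
       (PySem.Dict.mk [("grammar", a), ("style", b), ("readability", c), ("coherence", d), ("structure", e)]).modify "structure" 0 (· + 1))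
    = PySem.Dict.mk [("grammar", a + (qG x).toNat), ("style", b + (qS x).toNat),
        ("readability", c + (qR x).toNat), ("coherence", d + (qC x).toNat), ("structure", e + (qT x).toNat)] := by
  have hmodG : ∀ a b c d e : Int, (PySem.Dict.mk [("grammar", a), ("style", b), ("readability", c), ("coherence", d), ("structure", e)]).modify "grammar" 0 (· + 1)
      = PySem.Dict.mk [("grammar", a + 1), ("style", b), ("readability", c), ("coherence", d), ("structure", e)] := by
    intro a b c d e; simp [PySem.Dict.modify, PySem.Dict.get?, PySem.Dict.insert, PySem.Dict.getD]
  have hmodS : ∀ a b c d e : Int, (PySem.Dict.mk [("grammar", a), ("style", b), ("readability", c), ("coherence", d), ("structure", e)]).modify "style" 0 (· + 1)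
      = PySem.Dict.mk [("grammar", a), ("style", b + 1), ("readability", c), ("coherence", d), ("structure", e)] := by
    intro a b c d e; simp [PySem.Dict.modify, PySem.Dict.get?, PySem.Dict.insert, PySem.Dict.getD]
  have hmodR : ∀ a b c d e : Int, (PySem.Dict.mk [("grammar", a), ("style", b), ("readability", c), ("coherence", d), ("structure", e)]).modify "readability" 0 (· + 1)
      = PySem.Dict.mk [("grammar", a), ("style", b), ("readability", c + 1), ("coherence", d), ("structure", e)] := by
    intro a b c d e; simp [PySem.Dict.modify, PySem.Dict.get?, PySem.Dict.insert, PySem.Dict.getD]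
  have hmodC : ∀ a b c d e : Int, (PySem.Dict.mk [("grammar", a), ("style", b), ("readability", c), ("coherence", d), ("structure", e)]).modify "coherence" 0 (· + 1)
      = PySem.Dict.mk [("grammar", a), ("style", b), ("readability", c), ("coherence", d + 1), ("structure", e)] := by
    intro a b c d e; simp [PySem.Dict.modify, PySem.Dict.get?, PySem.Dict.insert, PySem.Dict.getD]
  have hmodT : ∀ a b c d e : Int, (PySem.Dict.mk [("grammar", a), ("style", b), ("readability", c), ("coherence", d), ("structure", e)]).modify "structure" 0 (· + 1)
      = PySem.Dict.mk [("grammar", a), ("style", b), ("readability", c), ("coherence", d), ("structure", e + 1)] := by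
    intro a b c d e; simp [PySem.Dict.modify, PySem.Dict.get?, PySem.Dict.insert, PySem.Dict.getD]
  show (if PySem.Str.isIn "grammar" (PySem.Str.lower x) then _ else _) = _
  by_cases h1 : PySem.Str.isIn "grammar" (PySem.Str.lower x) = true <;>
  by_cases h2 : PySem.Str.isIn "style" (PySem.Str.lower x) = true <;>
  by_cases h3 : PySem.Str.isIn "removed" (PySem.Str.lower x) = true <;>
  by_cases h4 : PySem.Str.isIn "simplified" (PySem.Str.lower x) = true <;>
  by_cases h5 : PySem.Str.isIn "split" (PySem.Str.lower x) = true <;>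
  by_cases h6 : PySem.Str.isIn "transition" (PySem.Str.lower x) = true <;>
  simp only [h1, h2, h3, h4, h5, h6, Bool.or_true, Bool.true_or, Bool.or_false, Bool.false_or,
    Bool.or_self, if_true, if_false, ite_true, ite_false, hmodG, hmodS, hmodR, hmodC, hmodT,
    qG, qS, qR, qC, qT, Bool.not_true, Bool.not_false, Bool.true_and, Bool.false_and,
    Bool.and_true, Bool.and_false, Bool.and_self, Bool.toNat_true, Bool.toNat_false] <;>
  norm_num

-- invariant of A's loop: the dict after the fold records the starting values plus the counts
lemma fold_items (l : List String) (a b c d e : Int) :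
    l.foldl (fun cs fix =>
      let fix_lower := PySem.Str.lower fix
      if PySem.Str.isIn "grammar" fix_lower then cs.modify "grammar" 0 (· + 1)
      else if PySem.Str.isIn "style" fix_lower || PySem.Str.isIn "removed" fix_lower then
        cs.modify "style" 0 (· + 1)
      else if PySem.Str.isIn "simplified" fix_lower || PySem.Str.isIn "split" fix_lower then
        cs.modify "readability" 0 (· + 1)
      else if PySem.Str.isIn "transition" fix_lower then cs.modify "coherence" 0 (· + 1)
      else cs.modify "structure" 0 (· + 1))
      (PySem.Dict.mk [("grammar", a), ("style", b), ("readability", c), ("coherence", d), ("structure", e)])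
    = PySem.Dict.mk [("grammar", a + l.countP qG), ("style", b + l.countP qS),
        ("readability", c + l.countP qR), ("coherence", d + l.countP qC), ("structure", e + l.countP qT)] := by
  induction l generalizing a b c d e with
  | nil => simp
  | cons x xs ih =>
    rw [List.foldl_cons, step_mk, ih]
    simp only [List.countP_cons, PySem.Dict.mk.injEq, List.cons.injEq, Prod.mk.injEq,
      and_true, true_and]
    cases hG : qG x <;> cases hS : qS x <;> cases hR : qR x <;> cases hC : qC x <;> cases hT : qT x <;>
    simp only [hG, hS, hR, hC, hT, Bool.toNat_true, Bool.toNat_false, if_true, if_false,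
      ite_true, ite_false] <;>
    refine ⟨by push_cast; ring, by push_cast; ring, by push_cast; ring, by push_cast; ring, by push_cast; ring⟩

-- each entry satisfies exactly one of the five predicates
lemma q_one (x : String) :
    (qG x).toNat + (qS x).toNat + (qR x).toNat + (qC x).toNat + (qT x).toNat = 1 := by
  unfold qT qC qR qS qG
  by_cases h1 : PySem.Str.isIn "grammar" (PySem.Str.lower x) = true <;>
  by_cases h2 : PySem.Str.isIn "style" (PySem.Str.lower x) = true <;>
  by_cases h3 : PySem.Str.isIn "removed" (PySem.Str.lower x) = true <;>
  by_cases h4 : PySem.Str.isIn "simplified" (PySem.Str.lower x) = true <;>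
  by_cases h5 : PySem.Str.isIn "split" (PySem.Str.lower x) = true <;>
  by_cases h6 : PySem.Str.isIn "transition" (PySem.Str.lower x) = true <;>
  simp only [h1, h2, h3, h4, h5, h6, Bool.not_true, Bool.not_false, Bool.true_and,
    Bool.false_and, Bool.and_true, Bool.and_false, Bool.true_or, Bool.or_true, Bool.false_or,
    Bool.or_false, Bool.and_self, Bool.or_self, Bool.toNat_true, Bool.toNat_false] <;>
  norm_num

-- the five counts partition the list
lemma count_sum (l : List String) :
    l.countP qG + l.countP qS + l.countP qR + l.countP qC + l.countP qT = l.length := by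
  induction l with
  | nil => simp
  | cons x xs ih =>
    have hx := q_one x
    simp only [Bool.toNat, Bool.cond_eq_if] at hx
    simp only [List.countP_cons, List.length_cons]
    omega

-- ===== VERDICT (by name: the statement is the Claim_ definition above) =====
theorem categorize_fixes_py_spec : Claim_equal_categorize_fixes_py := by
  intro editing_log _
  unfold Spec_categorize_fixes_py categorize_fixes_py categorize_fixes_py_alt
  have h1 : (editing_log.map (fun fix => PySem.Str.lower fix)).countP (fun l => PySem.Str.isIn "grammar" l)
      = editing_log.countP qG := by rw [List.countP_map]; rfl
  have h2 : (editing_log.map (fun fix => PySem.Str.lower fix)).countP (fun l =>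
        !PySem.Str.isIn "grammar" l && (PySem.Str.isIn "style" l || PySem.Str.isIn "removed" l))
      = editing_log.countP qS := by rw [List.countP_map]; rfl
  have h3 : (editing_log.map (fun fix => PySem.Str.lower fix)).countP (fun l =>
        !PySem.Str.isIn "grammar" l && !PySem.Str.isIn "style" l && !PySem.Str.isIn "removed" l
        && (PySem.Str.isIn "simplified" l || PySem.Str.isIn "split" l))
      = editing_log.countP qR := by rw [List.countP_map]; rfl
  have h4 : (editing_log.map (fun fix => PySem.Str.lower fix)).countP (fun l =>
        !PySem.Str.isIn "grammar" l && !PySem.Str.isIn "style" l && !PySem.Str.isIn "removed" l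
        && !PySem.Str.isIn "simplified" l && !PySem.Str.isIn "split" l
        && PySem.Str.isIn "transition" l)
      = editing_log.countP qC := by rw [List.countP_map]; rfl
  have hsum := count_sum editing_log
  simp only [show PySem.Dict.ofList [("grammar", (0:Int)), ("style", 0), ("readability", 0), ("coherence", 0), ("structure", 0)]
      = PySem.Dict.mk [("grammar", 0), ("style", 0), ("readability", 0), ("coherence", 0), ("structure", 0)] from rfl,
    fold_items, h1, h2, h3, h4, List.length_map, PySem.Dict.items, zero_add,
    List.cons.injEq, Prod.mk.injEq, and_true, true_and]
  omega
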